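-- pv_equiv track=rewrite | github.com/ConstLike/SecondQuantizationAlgebra | sqaMisc.py | generateValidMatchings
-- ===== SOURCE A (Python) =====
-- def generateValidMatchings(k, edges):
--   """
--   Generate k-matchings where no vertex is used more than once.
--
--   Backtracking algorithm that generates only valid matchings.
--
--   Args:
--     k: Number of edges to select
--     edges: List of (left_vertex, right_vertex) tuples
--
--   Yields:
--     Lists of k edges where each vertex appears at most once
--   """
--   def backtrack(start_idx, selected, used_left, used_right, remaining_k):
--     if remaining_k == 0:
--       yield list(selected)
--       return
--
--     for idx in range(start_idx, len(edges)):
--       left, right = edges[idx]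
--
--       if left in used_left or right in used_right:
--         continue
--
--       selected.append(edges[idx])
--       used_left.add(left)
--       used_right.add(right)
--
--       yield from backtrack(idx + 1, selected, used_left, used_right, remaining_k - 1)
--
--       selected.pop()
--       used_left.remove(left)
--       used_right.remove(right)
--
--   yield from backtrack(0, [], set(), set(), k)
-- ===== SOURCE B (Python) =====
-- def generateValidMatchings(k, edges):
--   """Generate-and-filter: enumerate all k-combinations of edges in
--   lexicographic index order, keep those whose left vertices are all
--   distinct and whose right vertices are all distinct."""
--   def combos(n, xs):
--     if n == 0:
--       return [[]]
--     if not xs: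
--       return []
--     head, tail = xs[0], xs[1:]
--     return [[head] + c for c in combos(n - 1, tail)] + combos(n, tail)
--
--   if k < 0:
--     return
--   for combo in combos(k, edges):
--     lefts = [l for l, _ in combo]
--     rights = [r for _, r in combo]
--     if len(set(lefts)) == len(lefts) and len(set(rights)) == len(rights):
--       yield combo
-- ===== Notes on version B (the rewrite author's own statement) =====
-- stated objective: alternative
-- what changed: Replaces the pruned backtracking search with used-vertex sets by a generate-and-filter scheme: enumerate all k-combinations of the edge list in lexicographic index order and keep those whose left vertices are pairwise distinct and whose right vertices are pairwise distinct.
import Mathlib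
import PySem

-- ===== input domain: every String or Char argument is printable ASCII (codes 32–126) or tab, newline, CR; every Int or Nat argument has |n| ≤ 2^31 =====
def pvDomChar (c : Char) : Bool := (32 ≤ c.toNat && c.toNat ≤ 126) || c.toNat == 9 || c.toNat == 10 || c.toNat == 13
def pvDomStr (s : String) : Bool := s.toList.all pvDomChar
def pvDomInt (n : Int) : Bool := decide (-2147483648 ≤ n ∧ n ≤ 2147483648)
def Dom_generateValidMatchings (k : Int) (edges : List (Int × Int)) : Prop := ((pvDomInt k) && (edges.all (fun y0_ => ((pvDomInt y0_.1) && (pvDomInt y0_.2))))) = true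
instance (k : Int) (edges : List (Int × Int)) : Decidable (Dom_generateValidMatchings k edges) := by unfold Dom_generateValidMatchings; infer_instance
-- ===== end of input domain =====

-- B replaces A's pruned backtracking (used-vertex sets, in-place select/undo) by
-- generate-and-filter: enumerate all k-combinations of the edge list and keep those
-- whose left vertices are pairwise distinct and right vertices are pairwise distinct
-- (objective: alternative, same enumeration order).

-- ===== PORT A =====
-- A's inner generator `backtrack(start_idx, …)`: the `for idx in range(start_idx, len(edges))`
-- loop is ported as `pvLoopA` recursing over the suffix edges[start_idx:] (same elements, same
-- order); `selected.append` / `.pop` and `used_*.add` / `.remove` become the extended arguments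
-- of the recursive call (the Python mutates and undoes; the value yielded is identical).
mutual
def pvBacktrackA (sel : List (Int × Int)) (usedL usedR : PySem.Set Int) (remK : Int)
    (rest : List (Int × Int)) : List (List (Int × Int)) :=
  if remK = 0 then [sel]
  else pvLoopA sel usedL usedR remK rest
termination_by (rest.length, 1)

def pvLoopA (sel : List (Int × Int)) (usedL usedR : PySem.Set Int) (remK : Int)
    (rest : List (Int × Int)) : List (List (Int × Int)) :=
  match rest with
  | [] => []
  | (l, r) :: rest' =>
    if usedL.contains l || usedR.contains r then
      pvLoopA sel usedL usedR remK rest'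
    else
      pvBacktrackA (sel ++ [(l, r)]) (usedL.add l) (usedR.add r) (remK - 1) rest'
        ++ pvLoopA sel usedL usedR remK rest'
termination_by (rest.length, 0)
end

def generateValidMatchings (k : Int) (edges : List (Int × Int)) : List (List (Int × Int)) :=
  pvBacktrackA [] PySem.Set.empty PySem.Set.empty k edges

-- ===== PORT B =====
-- Source B's helper `combos(n, xs)`
def pvCombosB (n : Int) (xs : List (Int × Int)) : List (List (Int × Int)) :=
  if n = 0 then [[]]
  else
    match xs with
    | [] => []
    | head :: tail => (pvCombosB (n - 1) tail).map (fun c => head :: c) ++ pvCombosB n tail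
termination_by xs.length

def generateValidMatchings_alt (k : Int) (edges : List (Int × Int)) : List (List (Int × Int)) :=
  if k < 0 then []
  else
    (pvCombosB k edges).filter (fun combo =>
      let lefts := combo.map (·.1)
      let rights := combo.map (·.2)
      ((PySem.Set.ofList lefts).length == lefts.length)
        && ((PySem.Set.ofList rights).length == rights.length))

-- ===== PRECONDITION & SPEC =====
def Spec_generateValidMatchings (k : Int) (edges : List (Int × Int)) (out : List (List (Int × Int))) : Prop := out = generateValidMatchings_alt k edges
instance (k : Int) (edges : List (Int × Int)) (out : List (List (Int × Int))) : Decidable (Spec_generateValidMatchings k edges out) := by unfold Spec_generateValidMatchings; infer_instance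

-- ===== CLAIM (what is proved, stated in full; the proofs are below) =====
def Claim_equal_generateValidMatchings : Prop := ∀ (k : Int) (edges : List (Int × Int)), Dom_generateValidMatchings k edges → Spec_generateValidMatchings k edges (generateValidMatchings k edges)

-- ===== LEMMAS AND PROOFS =====

-- the condition under which A's backtracking emits a combination c, given already-used vertex sets
def pvOkB (ul ur : PySem.Set Int) (c : List (Int × Int)) : Bool :=
  decide (c.map (·.1)).Nodup && decide (c.map (·.2)).Nodup
    && c.all (fun p => !(ul.contains p.1) && !(ur.contains p.2))

lemma pvContains_eq_false_iff (s : PySem.Set Int) (x : Int) :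
    s.contains x = false ↔ x ∉ s := by
  rw [← Bool.not_eq_true, PySem.Set.contains_iff]

lemma pvOkB_cons_bad (ul ur : PySem.Set Int) (l r : Int) (c : List (Int × Int))
    (h : (ul.contains l || ur.contains r) = true) :
    pvOkB ul ur ((l, r) :: c) = false := by
  simp only [pvOkB, List.all_cons]
  cases h1 : ul.contains l <;> cases h2 : ur.contains r <;> simp_all

lemma pvOkB_cons_good (ul ur : PySem.Set Int) (l r : Int) (c : List (Int × Int))
    (hl : ul.contains l = false) (hr : ur.contains r = false) :
    pvOkB ul ur ((l, r) :: c) = pvOkB (ul.add l) (ur.add r) c := by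
  have hl' : l ∉ ul := (pvContains_eq_false_iff ul l).mp hl
  have hr' : r ∉ ur := (pvContains_eq_false_iff ur r).mp hr
  rw [Bool.eq_iff_iff]
  simp only [pvOkB, List.map_cons, List.nodup_cons, List.all_cons, List.all_eq_true,
    Bool.and_eq_true, decide_eq_true_eq, Bool.not_eq_true', pvContains_eq_false_iff,
    PySem.Set.mem_add, List.mem_map, not_or, not_exists, hl', hr']
  constructor
  · rintro ⟨⟨⟨hln, hnl⟩, hrn, hnr⟩, -, hall⟩
    exact ⟨⟨hnl, hnr⟩, fun x hx => ⟨⟨(hall x hx).1, fun he => hln x ⟨hx, he⟩⟩,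
      (hall x hx).2, fun he => hrn x ⟨hx, he⟩⟩⟩
  · rintro ⟨⟨hnl, hnr⟩, hall⟩
    exact ⟨⟨⟨fun x hx => (hall x hx.1).1.2 hx.2, hnl⟩,
      fun x hx => (hall x hx.1).2.2 hx.2, hnr⟩, ⟨not_false, not_false⟩,
      fun x hx => ⟨(hall x hx).1.1, (hall x hx).2.1⟩⟩

lemma pvBacktrackA_ne (sel : List (Int × Int)) (ul ur : PySem.Set Int) (rk : Int)
    (rest : List (Int × Int)) (h : rk ≠ 0) :
    pvBacktrackA sel ul ur rk rest = pvLoopA sel ul ur rk rest := by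
  rw [pvBacktrackA]; simp [h]

lemma pvBacktrackA_eq (rest : List (Int × Int)) : ∀ (sel : List (Int × Int))
    (ul ur : PySem.Set Int) (rk : Int),
    pvBacktrackA sel ul ur rk rest
      = ((pvCombosB rk rest).filter (pvOkB ul ur)).map (fun c => sel ++ c) := by
  induction rest with
  | nil =>
    intro sel ul ur rk
    by_cases h0 : rk = 0
    · subst h0
      rw [pvBacktrackA, pvCombosB]
      simp [pvOkB]
    · rw [pvBacktrackA_ne _ _ _ _ _ h0, pvLoopA, pvCombosB]
      simp [h0]
  | cons hd rest' ih =>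
    intro sel ul ur rk
    obtain ⟨l, r⟩ := hd
    by_cases h0 : rk = 0
    · subst h0
      rw [pvBacktrackA, pvCombosB]
      simp [pvOkB]
    · rw [pvBacktrackA_ne _ _ _ _ _ h0, pvLoopA, pvCombosB]
      simp only [h0, if_false]
      rw [List.filter_append, List.filter_map, List.map_append]
      by_cases hc : (ul.contains l || ur.contains r) = true
      · rw [hc, if_pos rfl]
        have hnil : (pvCombosB (rk - 1) rest').filter
            ((pvOkB ul ur) ∘ (fun c => (l, r) :: c)) = [] := by
          apply List.filter_eq_nil_iff.mpr
          intro c _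
          simp [Function.comp, pvOkB_cons_bad _ _ _ _ _ hc]
        rw [hnil]
        simp only [List.map_nil, List.nil_append]
        rw [← pvBacktrackA_ne _ _ _ _ _ h0, ih]
      · rw [Bool.eq_false_iff.mpr hc, if_neg Bool.false_ne_true]
        have hl : ul.contains l = false := by
          cases h' : ul.contains l
          · rfl
          · exact absurd (by rw [h', Bool.true_or]) hc
        have hr : ur.contains r = false := by
          cases h' : ur.contains r
          · rfl
          · exact absurd (by rw [h', Bool.or_true]) hc
        have hfc : (pvCombosB (rk - 1) rest').filter ((pvOkB ul ur) ∘ (fun c => (l, r) :: c))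
            = (pvCombosB (rk - 1) rest').filter (pvOkB (ul.add l) (ur.add r)) := by
          apply List.filter_congr
          intro c _
          simp [Function.comp, pvOkB_cons_good _ _ _ _ _ hl hr]
        rw [hfc, ← pvBacktrackA_ne _ _ _ _ _ h0, ih, ih, List.map_map]
        congr 1
        apply List.map_congr_left
        intro c _
        simp

lemma pvCombosB_of_neg : ∀ (xs : List (Int × Int)) (n : Int), n < 0 → pvCombosB n xs = [] := by
  intro xs
  induction xs with
  | nil => intro n hn; rw [pvCombosB]; simp [show ¬(n = 0) by omega]
  | cons hd tail ih =>
    intro n hn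
    rw [pvCombosB]
    simp [show ¬(n = 0) by omega, ih (n - 1) (by omega), ih n hn]

lemma pvOfList_length_eq_iff (xs : List Int) :
    (PySem.Set.ofList xs).length = xs.length ↔ xs.Nodup := by
  induction xs with
  | nil => simp [PySem.Set.ofList_nil]
  | cons x xs ih =>
    rw [PySem.Set.ofList_cons x xs]
    simp only [List.length_cons, List.nodup_cons]
    have hsub : ((PySem.Set.ofList xs).discard x).length ≤ (PySem.Set.ofList xs).length :=
      List.length_filter_le _ _
    have hle := PySem.Set.length_ofList_le (xs := xs)
    constructor
    · intro h
      have hofl : (PySem.Set.ofList xs).length = xs.length := by omega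
      have hdeq : ((PySem.Set.ofList xs).discard x).length
          = (List.filter (fun y => !y == x) (PySem.Set.ofList xs)).length := rfl
      have hall : ∀ a ∈ PySem.Set.ofList xs, (!a == x) = true :=
        List.length_filter_eq_length_iff.mp (by omega)
      refine ⟨?_, ih.mp hofl⟩
      intro hmem
      have hx : x ∈ PySem.Set.ofList xs := (PySem.Set.mem_ofList xs x).mpr hmem
      have := hall x hx
      simp at this
    · rintro ⟨hnotin, hnd⟩
      have hx : x ∉ PySem.Set.ofList xs := fun h => hnotin ((PySem.Set.mem_ofList xs x).mp h)
      have hfil : (PySem.Set.ofList xs).discard x = PySem.Set.ofList xs := by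
        apply List.filter_eq_self.mpr
        intro a ha
        simp only [Bool.not_eq_eq_eq_not, Bool.not_true, beq_eq_false_iff_ne, ne_eq]
        intro hax; exact hx (hax ▸ ha)
      have hfil' : (PySem.Set.ofList xs).discard x = PySem.Set.ofList xs := hfil
      rw [hfil', ih.mpr hnd]

lemma pvOkB_empty (c : List (Int × Int)) :
    pvOkB PySem.Set.empty PySem.Set.empty c
      = (((PySem.Set.ofList (c.map (·.1))).length == (c.map (·.1)).length)
        && ((PySem.Set.ofList (c.map (·.2))).length == (c.map (·.2)).length)) := by
  rw [Bool.eq_iff_iff]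
  simp only [pvOkB, Bool.and_eq_true, decide_eq_true_eq, List.all_eq_true,
    Nat.beq_eq_true_eq, pvOfList_length_eq_iff]
  have : ∀ p : Int × Int, p ∈ c →
      ((!PySem.Set.contains PySem.Set.empty p.1) = true ∧ (!PySem.Set.contains PySem.Set.empty p.2) = true) := by
    intro p _
    exact ⟨rfl, rfl⟩
  constructor
  · rintro ⟨⟨h1, h2⟩, _⟩; exact ⟨h1, h2⟩
  · rintro ⟨h1, h2⟩; exact ⟨⟨h1, h2⟩, this⟩

-- ===== VERDICT (by name: the statement is the Claim_ definition above) =====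
theorem generateValidMatchings_spec : Claim_equal_generateValidMatchings := by
  intro k edges _
  unfold Spec_generateValidMatchings generateValidMatchings generateValidMatchings_alt
  rw [pvBacktrackA_eq]
  by_cases hk : k < 0
  · rw [if_pos hk, pvCombosB_of_neg edges k hk]
    simp
  · rw [if_neg hk]
    have hmap : (fun c : List (Int × Int) => [] ++ c) = id := by funext c; simp
    rw [hmap, List.map_id]
    apply List.filter_congr
    intro c _
    rw [pvOkB_empty]
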